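-- pv_equiv track=rewrite | github.com/T0nyX1ang/littlefish | littlefish/_mswar/analyzer.py | get_clicks
-- ===== SOURCE A (Python) =====
-- def get_clicks(action):
--     left, double, right = 0, 0, 0
--     for current in range(0, len(action)):
--         if action[current][0] == 0:
--             left += 1
--         elif action[current][0] == 1:
--             right += 1
--         elif action[current][0] == 4:
--             double += 1
--
--     return left, right, double
-- ===== SOURCE B (Python) =====
-- def get_clicks(action):
--     firsts = [a[0] for a in action]
--     return firsts.count(0), firsts.count(1), firsts.count(4)
-- ===== Notes on version B (the rewrite author's own statement) =====
-- stated objective: idiomatic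
-- what changed: Replaces the single-pass if/elif accumulator loop over indices by staged passes: project out the first elements once, then answer each of the three counts with a separate list.count scan; no branch chain and no running counters.
-- outside the precondition, e.g. on get_clicks([(0,), ()]): A raises IndexError, B raises IndexError
import Mathlib
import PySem

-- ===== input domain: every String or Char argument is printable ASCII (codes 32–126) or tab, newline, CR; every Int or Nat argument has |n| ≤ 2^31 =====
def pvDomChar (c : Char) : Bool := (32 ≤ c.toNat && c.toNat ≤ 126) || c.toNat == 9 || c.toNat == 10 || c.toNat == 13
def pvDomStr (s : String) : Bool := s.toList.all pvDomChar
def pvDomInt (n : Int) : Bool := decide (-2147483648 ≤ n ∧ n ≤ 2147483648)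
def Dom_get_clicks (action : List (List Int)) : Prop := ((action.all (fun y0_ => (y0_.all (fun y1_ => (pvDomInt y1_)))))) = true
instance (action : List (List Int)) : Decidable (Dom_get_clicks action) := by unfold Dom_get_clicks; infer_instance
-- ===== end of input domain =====

-- B drops A's single-pass if/elif accumulator loop: it projects the first elements once and answers each count with a separate list.count scan (idiomatic; same cost).

-- ===== PORT A =====
-- for current in range(0, len(action)): branch on action[current][0]; acc = (left, double, right); return (left, right, double)
def get_clicks (action : List (List Int)) : Int × Int × Int :=
  let s := (PySem.List.pyRange 0 (action.length : Int) 1).foldl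
    (fun (acc : Int × Int × Int) current =>
      if PySem.List.pyGetD (PySem.List.pyGetD action current []) 0 0 = 0 then (acc.1 + 1, acc.2.1, acc.2.2)
      else if PySem.List.pyGetD (PySem.List.pyGetD action current []) 0 0 = 1 then (acc.1, acc.2.1, acc.2.2 + 1)
      else if PySem.List.pyGetD (PySem.List.pyGetD action current []) 0 0 = 4 then (acc.1, acc.2.1 + 1, acc.2.2)
      else acc)
    (0, 0, 0)
  (s.1, s.2.2, s.2.1)

-- ===== PORT B =====
-- firsts = [a[0] for a in action]; return firsts.count(0), firsts.count(1), firsts.count(4)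
def get_clicks_alt (action : List (List Int)) : Int × Int × Int :=
  let firsts := action.map (fun a => PySem.List.pyGetD a 0 0)
  ((PySem.List.count firsts 0 : Int), (PySem.List.count firsts 1 : Int), (PySem.List.count firsts 4 : Int))

-- ===== PRECONDITION & SPEC =====
-- Pre_ excludes inputs containing an empty inner list, on which both A and B raise IndexError (a[0]).
def Pre_get_clicks (action : List (List Int)) : Prop := ∀ a ∈ action, a ≠ []
instance (action : List (List Int)) : Decidable (Pre_get_clicks action) := by unfold Pre_get_clicks; infer_instance
def pvWitness_get_clicks : List (List Int) := [[0], [1, 5], [4], [7]]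
def Spec_get_clicks (action : List (List Int)) (out : Int × Int × Int) : Prop := out = get_clicks_alt action
instance (action : List (List Int)) (out : Int × Int × Int) : Decidable (Spec_get_clicks action out) := by unfold Spec_get_clicks; infer_instance

-- ===== CLAIM (what is proved, stated in full; the proofs are below) =====
def Claim_equal_get_clicks : Prop := ∀ (action : List (List Int)), Dom_get_clicks action → Pre_get_clicks action → Spec_get_clicks action (get_clicks action)

-- ===== LEMMAS AND PROOFS =====

-- A's branch-chain fold over the rows computes the three counts of first elements.
theorem get_clicks_foldl_counts (l : List (List Int)) (left double right : Int) :
    l.foldl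
      (fun (acc : Int × Int × Int) (row : List Int) =>
        if PySem.List.pyGetD row 0 0 = 0 then (acc.1 + 1, acc.2.1, acc.2.2)
        else if PySem.List.pyGetD row 0 0 = 1 then (acc.1, acc.2.1, acc.2.2 + 1)
        else if PySem.List.pyGetD row 0 0 = 4 then (acc.1, acc.2.1 + 1, acc.2.2)
        else acc)
      (left, double, right)
    = (left + (l.map (fun row => PySem.List.pyGetD row 0 0)).count 0,
       double + (l.map (fun row => PySem.List.pyGetD row 0 0)).count 4,
       right + (l.map (fun row => PySem.List.pyGetD row 0 0)).count 1) := by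
  induction l generalizing left double right with
  | nil => simp
  | cons r xs ih =>
    simp only [List.foldl_cons, List.map_cons, List.count_cons]
    by_cases h0 : PySem.List.pyGetD r 0 0 = 0
    · simp [h0, ih, Prod.ext_iff]; ring
    · by_cases h1 : PySem.List.pyGetD r 0 0 = 1
      · simp [h1, ih, Prod.ext_iff]; ring
      · by_cases h4 : PySem.List.pyGetD r 0 0 = 4
        · simp [h4, ih, Prod.ext_iff]; ring
        · simp [h0, h1, h4, ih]

-- ===== VERDICT (by name: the statement is the Claim_ definition above) =====
theorem get_clicks_spec : Claim_equal_get_clicks := by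
  intro action _ _
  unfold Spec_get_clicks get_clicks get_clicks_alt
  rw [show (fun (acc : Int × Int × Int) (current : Int) =>
      if PySem.List.pyGetD (PySem.List.pyGetD action current []) 0 0 = 0 then (acc.1 + 1, acc.2.1, acc.2.2)
      else if PySem.List.pyGetD (PySem.List.pyGetD action current []) 0 0 = 1 then (acc.1, acc.2.1, acc.2.2 + 1)
      else if PySem.List.pyGetD (PySem.List.pyGetD action current []) 0 0 = 4 then (acc.1, acc.2.1 + 1, acc.2.2)
      else acc)
    = (fun (acc : Int × Int × Int) (current : Int) =>
        (fun (acc : Int × Int × Int) (row : List Int) =>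
          if PySem.List.pyGetD row 0 0 = 0 then (acc.1 + 1, acc.2.1, acc.2.2)
          else if PySem.List.pyGetD row 0 0 = 1 then (acc.1, acc.2.1, acc.2.2 + 1)
          else if PySem.List.pyGetD row 0 0 = 4 then (acc.1, acc.2.1 + 1, acc.2.2)
          else acc) acc (PySem.List.pyGetD action current [])) from rfl]
  rw [PySem.List.foldl_pyRange_zero_pyGetD' action ([] : List Int)
        (fun (acc : Int × Int × Int) (row : List Int) =>
          if PySem.List.pyGetD row 0 0 = 0 then (acc.1 + 1, acc.2.1, acc.2.2)
          else if PySem.List.pyGetD row 0 0 = 1 then (acc.1, acc.2.1, acc.2.2 + 1)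
          else if PySem.List.pyGetD row 0 0 = 4 then (acc.1, acc.2.1 + 1, acc.2.2)
          else acc) (0, 0, 0)]
  rw [get_clicks_foldl_counts]
  simp [PySem.List.count_eq]
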